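-- pv_equiv track=rewrite | github.com/hbreiner/CSP---Caso-Sudoku | RESOLUTOR.py | es_consistente_con_asignacion
-- ===== SOURCE A (Python) =====
-- def es_consistente_con_asignacion(variable, valor, asignacion, restricciones):
--     """
--     Verifica si asignar 'valor' a 'variable' es consistente con la 'asignacion' actual
--     basado en las reglas del Sudoku (restricciones).
--     """
--     for grupo_restriccion in restricciones:
--         if variable in grupo_restriccion:
--             for variable_par in grupo_restriccion:
--                 if variable_par != variable and variable_par in asignacion:
--                     if asignacion[variable_par] == valor:
--                         return False
--     return True
-- ===== SOURCE B (Python) =====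
-- def es_consistente_con_asignacion(variable, valor, asignacion, restricciones):
--     # Inverted traversal: scan the assignment once; an entry conflicts iff it holds
--     # 'valor', is not 'variable', and shares some restriction group with 'variable'.
--     for otra, val in asignacion.items():
--         if val == valor and otra != variable and any(variable in g and otra in g for g in restricciones):
--             return False
--     return True
-- ===== Notes on version B (the rewrite author's own statement) =====
-- stated objective: alternative
-- what changed: Inverts the traversal: instead of scanning restriction groups and looking each group member up in the assignment dict, B scans the assignment entries once and, for each entry already holding the value, tests whether it shares a restriction group with the variable (no dict lookup at all).
import Mathlib
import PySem

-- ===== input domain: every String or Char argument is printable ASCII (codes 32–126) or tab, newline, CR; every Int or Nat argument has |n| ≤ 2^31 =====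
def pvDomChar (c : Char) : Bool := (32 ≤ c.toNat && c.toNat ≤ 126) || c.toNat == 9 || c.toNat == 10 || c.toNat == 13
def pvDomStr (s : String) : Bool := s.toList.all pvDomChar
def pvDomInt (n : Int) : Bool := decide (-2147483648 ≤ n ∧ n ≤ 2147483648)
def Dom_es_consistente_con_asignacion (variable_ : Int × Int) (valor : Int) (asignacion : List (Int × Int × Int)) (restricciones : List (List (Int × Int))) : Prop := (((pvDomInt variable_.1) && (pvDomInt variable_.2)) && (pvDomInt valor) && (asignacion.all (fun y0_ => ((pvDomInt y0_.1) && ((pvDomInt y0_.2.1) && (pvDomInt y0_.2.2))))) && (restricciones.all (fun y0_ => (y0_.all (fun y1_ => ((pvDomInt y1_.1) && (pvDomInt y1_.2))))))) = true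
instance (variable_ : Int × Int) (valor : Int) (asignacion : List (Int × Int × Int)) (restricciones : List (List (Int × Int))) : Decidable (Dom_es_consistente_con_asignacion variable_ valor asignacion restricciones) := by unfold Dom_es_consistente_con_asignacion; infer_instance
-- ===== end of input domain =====

-- B inverts the traversal: it scans the assignment entries once and, for each entry
-- holding 'valor', tests whether it shares a restriction group with the variable;
-- A's per-group-member dict lookup disappears (objective: alternative, similar cost).

-- ===== PORT A =====
-- the dict 'asignacion' as an association list: first-match lookup of key (k1,k2)
def pvGet? (asignacion : List (Int × Int × Int)) (k : Int × Int) : Option Int :=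
  match asignacion with
  | [] => none
  | (a, b, v) :: rest => if a = k.1 ∧ b = k.2 then some v else pvGet? rest k

-- inner loop of A over one restriction group: true iff a conflicting pair is found
def pvInnerA (variable_ : Int × Int) (valor : Int) (asignacion : List (Int × Int × Int)) : List (Int × Int) → Bool
  | [] => false
  | vp :: rest =>
      if vp ≠ variable_ ∧ pvGet? asignacion vp = some valor then true
      else pvInnerA variable_ valor asignacion rest

def es_consistente_con_asignacion (variable_ : Int × Int) (valor : Int) (asignacion : List (Int × Int × Int)) (restricciones : List (List (Int × Int))) : Bool :=
  match restricciones with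
  | [] => true
  | g :: rest =>
      if variable_ ∈ g then
        if pvInnerA variable_ valor asignacion g then false
        else es_consistente_con_asignacion variable_ valor asignacion rest
      else es_consistente_con_asignacion variable_ valor asignacion rest

-- ===== PORT B =====
-- 'asignacion.items()': the distinct key bindings of the association list under the
-- first-match convention (exact for an actual dict, whose keys are already distinct)
def pvItems (l : List (Int × Int × Int)) : List (Int × Int × Int) :=
  match l with
  | [] => []
  | (a, b, v) :: rest =>
      (a, b, v) :: pvItems (rest.filter (fun p => decide ((p.1, p.2.1) ≠ (a, b))))
termination_by l.length
decreasing_by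
  simp only [List.length_cons, List.length_unattach]
  exact Nat.lt_succ_of_le (le_trans (List.length_filter_le _ _) (by simp))

-- B's loop over the assignment entries, with its early return
def pvCheckB (variable_ : Int × Int) (valor : Int) (restricciones : List (List (Int × Int))) : List (Int × Int × Int) → Bool
  | [] => true
  | (a, b, v) :: rest =>
      if v = valor ∧ (a, b) ≠ variable_ ∧ restricciones.any (fun g => decide (variable_ ∈ g ∧ (a, b) ∈ g)) then false
      else pvCheckB variable_ valor restricciones rest

def es_consistente_con_asignacion_alt (variable_ : Int × Int) (valor : Int) (asignacion : List (Int × Int × Int)) (restricciones : List (List (Int × Int))) : Bool :=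
  pvCheckB variable_ valor restricciones (pvItems asignacion)

-- ===== PRECONDITION & SPEC =====
def Spec_es_consistente_con_asignacion (variable_ : Int × Int) (valor : Int) (asignacion : List (Int × Int × Int)) (restricciones : List (List (Int × Int))) (out : Bool) : Prop := out = es_consistente_con_asignacion_alt variable_ valor asignacion restricciones
instance (variable_ : Int × Int) (valor : Int) (asignacion : List (Int × Int × Int)) (restricciones : List (List (Int × Int))) (out : Bool) : Decidable (Spec_es_consistente_con_asignacion variable_ valor asignacion restricciones out) := by unfold Spec_es_consistente_con_asignacion; infer_instance

-- ===== CLAIM (what is proved, stated in full; the proofs are below) =====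
def Claim_equal_es_consistente_con_asignacion : Prop := ∀ (variable_ : Int × Int) (valor : Int) (asignacion : List (Int × Int × Int)) (restricciones : List (List (Int × Int))), Dom_es_consistente_con_asignacion variable_ valor asignacion restricciones → Spec_es_consistente_con_asignacion variable_ valor asignacion restricciones (es_consistente_con_asignacion variable_ valor asignacion restricciones)

-- ===== LEMMAS AND PROOFS =====

-- A's inner loop finds a conflict iff one exists in the group
theorem pvInnerA_eq_true_iff (variable_ : Int × Int) (valor : Int) (asignacion : List (Int × Int × Int)) (g : List (Int × Int)) :
    pvInnerA variable_ valor asignacion g = true ↔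
      ∃ vp ∈ g, vp ≠ variable_ ∧ pvGet? asignacion vp = some valor := by
  induction g with
  | nil => simp [pvInnerA]
  | cons vp rest ih =>
      simp only [pvInnerA]
      split_ifs with h
      · simp only [true_iff]
        exact ⟨vp, List.mem_cons_self .., h⟩
      · rw [ih]
        constructor
        · rintro ⟨w, hw, hcond⟩
          exact ⟨w, List.mem_cons_of_mem _ hw, hcond⟩
        · rintro ⟨w, hw, hcond⟩
          rcases List.mem_cons.mp hw with rfl | hw
          · exact absurd hcond h
          · exact ⟨w, hw, hcond⟩

-- A returns false iff some group containing the variable has a conflicting neighbor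
theorem esA_eq_false_iff (variable_ : Int × Int) (valor : Int) (asignacion : List (Int × Int × Int)) (restricciones : List (List (Int × Int))) :
    es_consistente_con_asignacion variable_ valor asignacion restricciones = false ↔
      ∃ g ∈ restricciones, variable_ ∈ g ∧
        ∃ vp ∈ g, vp ≠ variable_ ∧ pvGet? asignacion vp = some valor := by
  induction restricciones with
  | nil => simp [es_consistente_con_asignacion]
  | cons g rest ih =>
      simp only [es_consistente_con_asignacion]
      by_cases hm : variable_ ∈ g
      · by_cases hc : pvInnerA variable_ valor asignacion g = true
        · simp only [hm, if_true, hc]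
          simp only [true_iff]
          exact ⟨g, List.mem_cons_self .., hm, (pvInnerA_eq_true_iff _ _ _ _).mp hc⟩
        · simp only [hm, if_true, Bool.not_eq_true] at *
          rw [if_neg (by simp [hc]), ih]
          constructor
          · rintro ⟨w, hw, hcond⟩
            exact ⟨w, List.mem_cons_of_mem _ hw, hcond⟩
          · rintro ⟨w, hw, hmw, hconf⟩
            rcases List.mem_cons.mp hw with rfl | hw
            · exact absurd ((pvInnerA_eq_true_iff _ _ _ _).mpr hconf) (by simp [hc])
            · exact ⟨w, hw, hmw, hconf⟩
      · simp only [hm, if_false, ih]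
        constructor
        · rintro ⟨w, hw, hcond⟩
          exact ⟨w, List.mem_cons_of_mem _ hw, hcond⟩
        · rintro ⟨w, hw, hmw, hconf⟩
          rcases List.mem_cons.mp hw with rfl | hw
          · exact absurd hmw hm
          · exact ⟨w, hw, hmw, hconf⟩

-- filtering out a key other than the looked-up one does not change first-match lookup
theorem pvGet?_filter_ne (l : List (Int × Int × Int)) (a b : Int) (k : Int × Int) (hk : k ≠ (a, b)) :
    pvGet? (l.filter (fun p => decide ((p.1, p.2.1) ≠ (a, b)))) k = pvGet? l k := by
  induction l with
  | nil => rfl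
  | cons p rest ih =>
      obtain ⟨x, y, v⟩ := p
      by_cases hp : ((x, y) : Int × Int) = (a, b)
      · have hd : (decide (((x, y, v).1, (x, y, v).2.1) ≠ (a, b))) = false := by simp [hp]
        rw [List.filter_cons, hd]
        simp only [Bool.false_eq_true, if_false]
        rw [ih]
        have hnot : ¬(x = k.1 ∧ y = k.2) := by
          rintro ⟨h1, h2⟩
          exact hk (by rw [← hp]; cases k; simp_all)
        simp [pvGet?, hnot]
      · have hd : (decide (((x, y, v).1, (x, y, v).2.1) ≠ (a, b))) = true := decide_eq_true hp
        rw [List.filter_cons, hd]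
        simp only [if_true]
        simp only [pvGet?]
        split_ifs with h
        · rfl
        · exact ih

-- every item comes from the list
theorem pvItems_sublist : ∀ (n : Nat) (l : List (Int × Int × Int)), l.length ≤ n →
    ∀ x ∈ pvItems l, x ∈ l := by
  intro n
  induction n with
  | zero =>
      intro l hl
      rw [List.length_eq_zero_iff.mp (Nat.le_zero.mp hl)]
      simp [pvItems]
  | succ n ih =>
      intro l hl x hx
      match l with
      | [] => simp [pvItems] at hx
      | (a, b, v) :: rest =>
          rw [pvItems] at hx
          rcases List.mem_cons.mp hx with rfl | hx
          · exact List.mem_cons_self ..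
          · have hlen : (rest.filter (fun p => decide ((p.1, p.2.1) ≠ (a, b)))).length ≤ n :=
              le_trans (List.length_filter_le _ _) (Nat.le_of_succ_le_succ hl)
            exact List.mem_cons_of_mem _ (List.mem_of_mem_filter (ih _ hlen x hx))

-- membership in the items list is exactly first-match lookup (by strong induction on length)
theorem mem_pvItems_of_le (x : Int × Int × Int) :
    ∀ (n : Nat) (l : List (Int × Int × Int)), l.length ≤ n →
      (x ∈ pvItems l ↔ pvGet? l (x.1, x.2.1) = some x.2.2) := by
  intro n
  induction n with
  | zero =>
      intro l hl
      rw [List.length_eq_zero_iff.mp (Nat.le_zero.mp hl)]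
      simp [pvItems, pvGet?]
  | succ n ih =>
      intro l hl
      match l with
      | [] => simp [pvItems, pvGet?]
      | (a, b, v) :: rest =>
          obtain ⟨x1, x2, x3⟩ := x
          rw [pvItems]
          have hlen : (rest.filter (fun p => decide ((p.1, p.2.1) ≠ (a, b)))).length ≤ n :=
            le_trans (List.length_filter_le _ _) (Nat.le_of_succ_le_succ hl)
          simp only [List.mem_cons, pvGet?]
          by_cases hk : ((x1, x2) : Int × Int) = (a, b)
          · injection hk with h1 h2
            subst h1; subst h2
            rw [if_pos ⟨rfl, rfl⟩]
            constructor
            · rintro (h | h)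
              · injection h with h1 h2
                injection h2 with h2 h3
                simp [h3]
              · have hmem := pvItems_sublist _ _ hlen _ h
                have := List.of_mem_filter hmem
                simp at this
            · intro h
              have : v = x3 := by simpa using h
              exact Or.inl (by simp [this])
          · have hcond : ¬(a = x1 ∧ b = x2) := by
              rintro ⟨h1, h2⟩; exact hk (by simp [h1, h2])
            rw [if_neg hcond, ih _ hlen, pvGet?_filter_ne _ _ _ _ hk]
            constructor
            · rintro (h | h)
              · exact absurd (by injection h with h1 h2; injection h2 with h2 h3; exact ⟨h1.symm, h2.symm⟩) hcond
              · exact h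
            · exact Or.inr

theorem mem_pvItems_iff (l : List (Int × Int × Int)) (x : Int × Int × Int) :
    x ∈ pvItems l ↔ pvGet? l (x.1, x.2.1) = some x.2.2 :=
  mem_pvItems_of_le x l.length l le_rfl

-- B's loop returns false iff some scanned entry conflicts
theorem pvCheckB_eq_false_iff (variable_ : Int × Int) (valor : Int) (restricciones : List (List (Int × Int))) (l : List (Int × Int × Int)) :
    pvCheckB variable_ valor restricciones l = false ↔
      ∃ e ∈ l, e.2.2 = valor ∧ (e.1, e.2.1) ≠ variable_ ∧
        ∃ g ∈ restricciones, variable_ ∈ g ∧ (e.1, e.2.1) ∈ g := by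
  induction l with
  | nil => simp [pvCheckB]
  | cons e rest ih =>
      obtain ⟨a, b, v⟩ := e
      simp only [pvCheckB]
      split_ifs with h
      · simp only [true_iff]
        obtain ⟨h1, h2, h3⟩ := h
        simp only [List.any_eq_true, decide_eq_true_eq] at h3
        obtain ⟨g, hg, hcond⟩ := h3
        exact ⟨(a, b, v), List.mem_cons_self .., h1, h2, g, hg, hcond⟩
      · rw [ih]
        constructor
        · rintro ⟨w, hw, hcond⟩
          exact ⟨w, List.mem_cons_of_mem _ hw, hcond⟩
        · rintro ⟨w, hw, h1, h2, g, hg, hc1, hc2⟩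
          rcases List.mem_cons.mp hw with rfl | hw
          · exact absurd ⟨h1, h2, by simp only [List.any_eq_true, decide_eq_true_eq]; exact ⟨g, hg, hc1, hc2⟩⟩ h
          · exact ⟨w, hw, h1, h2, g, hg, hc1, hc2⟩

-- ===== VERDICT (by name: the statement is the Claim_ definition above) =====
theorem es_consistente_con_asignacion_spec : Claim_equal_es_consistente_con_asignacion := by
  intro variable_ valor asignacion restricciones _
  unfold Spec_es_consistente_con_asignacion es_consistente_con_asignacion_alt
  have key : es_consistente_con_asignacion variable_ valor asignacion restricciones = false ↔
      pvCheckB variable_ valor restricciones (pvItems asignacion) = false := by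
    rw [esA_eq_false_iff, pvCheckB_eq_false_iff]
    constructor
    · rintro ⟨g, hg, hvg, vp, hvpg, hne, hget⟩
      refine ⟨(vp.1, vp.2, valor), ?_, rfl, by simpa using hne, g, hg, hvg, by simpa using hvpg⟩
      rw [mem_pvItems_iff]
      simpa using hget
    · rintro ⟨e, he, hval, hne, g, hg, hvg, heg⟩
      rw [mem_pvItems_iff] at he
      exact ⟨g, hg, hvg, (e.1, e.2.1), heg, hne, by rw [he, hval]⟩
  cases hA : es_consistente_con_asignacion variable_ valor asignacion restricciones with
  | false => exact (key.mp hA).symm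
  | true =>
      cases hB : pvCheckB variable_ valor restricciones (pvItems asignacion) with
      | false => rw [key.mpr hB] at hA; exact hA.symm
      | true => rfl
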